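-- pv_equiv track=rewrite | github.com/VultureProject/vulture3-gui | gui/models/dataset_settings.py | little_endian
-- ===== SOURCE A (Python) =====
-- def little_endian(string, size):
--     to_return = ""
--     if size == 8:
--         for i in range(0, len(string), 8):
--             to_return += string[i+6:i+8]+string[i+4:i+6]+string[i+2:i+4]+string[i:i+2]
--     if size == 16:
--         for i in range(0, len(string), 16):
--             to_return += string[i+14:i+16]+string[i+12:i+14]+string[i+10:i+12]+string[i+8:i+10]+string[i+6:i+8]+string[i+4:i+6]+string[i+2:i+4]+string[i:i+2]
--     return to_return
-- ===== SOURCE B (Python) =====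
-- def little_endian(string, size):
--     if size not in (8, 16):
--         return ""
--     width = size // 2
--     out = []
--     stack = []
--     for k in range(0, len(string), 2):
--         stack.append(string[k:k + 2])
--         if len(stack) == width:
--             while stack:
--                 out.append(stack.pop())
--     while stack:
--         out.append(stack.pop())
--     return "".join(out)
-- ===== Notes on version B (the rewrite author's own statement) =====
-- stated objective: alternative
-- what changed: Replaces A's two branches of unrolled per-chunk slice concatenations with a single streaming pass that pushes 2-char byte groups onto an explicit stack and pops it to the output at each chunk boundary (and once at the end for a partial chunk).
import Mathlib
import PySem

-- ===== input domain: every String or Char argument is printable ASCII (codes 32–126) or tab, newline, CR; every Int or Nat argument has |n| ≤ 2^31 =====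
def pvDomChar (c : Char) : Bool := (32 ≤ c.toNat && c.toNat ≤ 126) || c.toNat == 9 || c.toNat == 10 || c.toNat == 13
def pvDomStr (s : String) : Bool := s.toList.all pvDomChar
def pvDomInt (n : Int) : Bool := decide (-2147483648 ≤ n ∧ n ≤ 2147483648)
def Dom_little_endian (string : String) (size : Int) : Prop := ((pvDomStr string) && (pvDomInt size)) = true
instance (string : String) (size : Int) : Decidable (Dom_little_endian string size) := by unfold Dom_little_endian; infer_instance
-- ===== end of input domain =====

-- B replaces A's unrolled per-chunk slice concatenations with one streaming pass over
-- 2-char byte groups using an explicit stack popped at chunk boundaries (alternative algorithm).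


-- ===== PORT A =====
-- literal transliteration: to_return accumulated as a List Char, += becomes foldl-append
def little_endian (string : String) (size : Int) : String :=
  let s := string.toList
  let n : Int := PySem.Str.len string
  let t0 : List Char := []
  let t1 : List Char :=
    if size = 8 then
      (PySem.List.pyRange 0 n 8).foldl (fun acc i =>
        acc ++ (PySem.List.slice s (some (i+6)) (some (i+8)) ++
                PySem.List.slice s (some (i+4)) (some (i+6)) ++
                PySem.List.slice s (some (i+2)) (some (i+4)) ++
                PySem.List.slice s (some i) (some (i+2)))) t0
    else t0
  let t2 : List Char :=
    if size = 16 then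
      (PySem.List.pyRange 0 n 16).foldl (fun acc i =>
        acc ++ (PySem.List.slice s (some (i+14)) (some (i+16)) ++
                PySem.List.slice s (some (i+12)) (some (i+14)) ++
                PySem.List.slice s (some (i+10)) (some (i+12)) ++
                PySem.List.slice s (some (i+8)) (some (i+10)) ++
                PySem.List.slice s (some (i+6)) (some (i+8)) ++
                PySem.List.slice s (some (i+4)) (some (i+6)) ++
                PySem.List.slice s (some (i+2)) (some (i+4)) ++
                PySem.List.slice s (some i) (some (i+2)))) t1
    else t1
  String.ofList t2

-- ===== PORT B =====
-- literal transliteration of Source B: guard, then one streaming pass pushing each 2-char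
-- group on a stack and popping the whole stack to `out` when it reaches `width`
-- (each drain loop 'while stack: out.append(stack.pop())' is out ++ stack.reverse)
def little_endian_alt (string : String) (size : Int) : String :=
  if size = 8 ∨ size = 16 then
    let s := string.toList
    let width : Int := PySem.Int.floordiv size 2
    let r :=
      (PySem.List.pyRange 0 (PySem.Str.len string) 2).foldl
        (fun (st : List (List Char) × List (List Char)) k =>
          let stack := st.2 ++ [PySem.List.slice s (some k) (some (k+2))]
          if (stack.length : Int) = width then (st.1 ++ stack.reverse, []) else (st.1, stack))
        ([], [])
    String.ofList ((r.1 ++ r.2.reverse).flatten)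
  else ""

-- ===== PRECONDITION & SPEC =====
def Spec_little_endian (string : String) (size : Int) (out : String) : Prop := out = little_endian_alt string size
instance (string : String) (size : Int) (out : String) : Decidable (Spec_little_endian string size out) := by unfold Spec_little_endian; infer_instance

-- ===== CLAIM =====
def Claim_equal_little_endian : Prop := ∀ (string : String) (size : Int), Dom_little_endian string size → Spec_little_endian string size (little_endian string size)

-- ===== LEMMAS AND PROOFS =====

-- byte group k of s: s[2k:2k+2]
def grp (s : List Char) (k : Nat) : List Char := (s.drop (2*k)).take 2

-- reverse each consecutive group of w elements
def groupRev (w : Nat) (ps : List (List Char)) : List (List Char) :=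
  if h : ps = [] ∨ w = 0 then [] else
    (ps.take w).reverse ++ groupRev w (ps.drop w)
termination_by ps.length
decreasing_by
  push_neg at h
  have h1 : 0 < ps.length := List.length_pos_of_ne_nil h.1
  simp only [List.length_drop]
  omega

-- the step function of B's streaming loop, with the stack-length test on Nat
def stepN (w : Nat) (st : List (List Char) × List (List Char)) (p : List Char) :
    List (List Char) × List (List Char) :=
  if (st.2 ++ [p]).length = w then (st.1 ++ (st.2 ++ [p]).reverse, []) else (st.1, st.2 ++ [p])

lemma rangeStep (c : Int) (cn N : Nat) (hc : c = (cn : Int)) (hcn : 0 < cn) :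
    PySem.List.pyRange 0 (N : Int) c = (List.range ((N + cn - 1) / cn)).map (fun k : Nat => c * k) := by
  subst hc
  rw [PySem.List.pyRange_of_pos 0 (N : Int) (by exact_mod_cast hcn)]
  have hcount : (if (0:Int) < (N:Int) then (((N:Int) - 0 + cn - 1) / cn).toNat else 0) = (N + cn - 1) / cn := by
    rcases Nat.eq_zero_or_pos N with h | h
    · subst h
      rw [if_neg (by norm_num), Nat.div_eq_of_lt (by omega : 0 + cn - 1 < cn)]
    · rw [if_pos (by exact_mod_cast h)]
      have h1 : ((N:Int) - 0 + cn - 1) = ((N + cn - 1 : Nat) : Int) := by push_cast; omega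
      rw [h1]
      exact Nat.add_zero _
  rw [hcount]
  exact List.map_congr_left (fun k _ => by simp)

lemma chunk_take (w : Nat) (ps : List (List Char)) :
    ((List.range w).reverse.map (fun j => ps.getD j [])).flatten = (ps.take w).reverse.flatten := by
  induction w with
  | zero => simp
  | succ w ih =>
    rw [List.range_succ, List.reverse_append]
    simp only [List.reverse_singleton, List.singleton_append, List.map_cons, List.flatten_cons, ih]
    by_cases h : w < ps.length
    · rw [List.take_succ, List.getElem?_eq_getElem h]
      simp only [List.getD, List.getElem?_eq_getElem h, Option.getD_some, Option.toList_some,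
        List.reverse_append, List.reverse_singleton, List.singleton_append, List.flatten_cons]
    · push_neg at h
      rw [List.getD_eq_default _ _ h, List.take_succ, List.getElem?_eq_none h]
      simp

lemma groupRev_small (w : Nat) (ps : List (List Char)) (h : ps.length < w) :
    groupRev w ps = ps.reverse := by
  rw [groupRev]
  by_cases hp : ps = []
  · simp [hp]
  · rw [dif_neg (by push_neg; exact ⟨hp, by omega⟩)]
    rw [List.take_of_length_le (by omega), List.drop_eq_nil_of_le (by omega)]
    rw [groupRev]
    simp

lemma groupRev_flat_aux (w : Nat) (hw : 0 < w) :
    ∀ (m : Nat) (ps : List (List Char)), ps.length ≤ m →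
      (groupRev w ps).flatten =
        (List.range ((ps.length + w - 1) / w)).flatMap
          (fun t => ((List.range w).reverse.map (fun j => ps.getD (w*t+j) [])).flatten) := by
  intro m
  induction m with
  | zero =>
    intro ps h
    have hp : ps = [] := List.length_eq_zero_iff.mp (by omega)
    subst hp
    rw [groupRev]
    simp [Nat.div_eq_of_lt (by omega : 0 + w - 1 < w)]
  | succ m ih =>
    intro ps h
    by_cases hp : ps = []
    · subst hp
      rw [groupRev]
      simp [Nat.div_eq_of_lt (by omega : 0 + w - 1 < w)]
    · have hL : 0 < ps.length := List.length_pos_of_ne_nil hp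
      have hcount : (ps.length + w - 1) / w = (ps.length - 1) / w + 1 := by
        have h1 : ps.length + w - 1 = (ps.length - 1) + w := by omega
        rw [h1, Nat.add_div_right _ hw]
      have hdropcount : ((ps.drop w).length + w - 1) / w = (ps.length - 1) / w := by
        rw [List.length_drop]
        by_cases hlw : ps.length ≤ w
        · have h1 : ps.length - w = 0 := by omega
          rw [h1]
          rw [Nat.div_eq_of_lt (by omega : 0 + w - 1 < w), Nat.div_eq_of_lt (by omega : ps.length - 1 < w)]
        · have h1 : ps.length - w + w - 1 = (ps.length - 1 - w) + w := by omega
          rw [h1, Nat.add_div_right _ hw]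
          conv_rhs => rw [show ps.length - 1 = (ps.length - 1 - w) + w by omega, Nat.add_div_right _ hw]
      rw [groupRev, dif_neg (by push_neg; exact ⟨hp, by omega⟩)]
      rw [List.flatten_append, hcount, List.range_succ_eq_map]
      rw [List.flatMap_cons, List.flatMap_map]
      congr 1
      · rw [← chunk_take]
        congr 1
        exact List.map_congr_left (fun j _ => by simp)
      · rw [ih (ps.drop w) (by simp only [List.length_drop]; omega), hdropcount]
        apply List.flatMap_congr
        intro t _
        congr 1
        apply List.map_congr_left
        intro j _
        simp only [List.getD, List.getElem?_drop]
        congr 2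
        rw [Nat.mul_succ]
        omega

lemma stack_run (w : Nat) (hw : 0 < w) (L : List (List Char)) :
    ∀ (out stack : List (List Char)), stack.length < w →
      (L.foldl (stepN w) (out, stack)).1 ++ (L.foldl (stepN w) (out, stack)).2.reverse =
        out ++ groupRev w (stack ++ L) := by
  induction L with
  | nil =>
    intro out stack hs
    simp only [List.foldl_nil, List.append_nil]
    rw [groupRev_small w stack hs]
  | cons p L ih =>
    intro out stack hs
    simp only [List.foldl_cons]
    by_cases hlen : (stack ++ [p]).length = w
    · rw [show stepN w (out, stack) p = (out ++ (stack ++ [p]).reverse, []) from by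
        simp only [stepN]; rw [if_pos hlen]]
      rw [ih (out ++ (stack ++ [p]).reverse) [] (by simpa using hw)]
      simp only [List.nil_append]
      have hne : ¬((stack ++ [p]) ++ L = [] ∨ w = 0) := by
        push_neg
        refine ⟨fun hx => ?_, by omega⟩
        have := congrArg List.length hx
        simp at this
      have hgr : groupRev w ((stack ++ [p]) ++ L) = (stack ++ [p]).reverse ++ groupRev w L := by
        rw [groupRev, dif_neg hne, List.take_left' hlen, List.drop_left' hlen]
      rw [show stack ++ p :: L = (stack ++ [p]) ++ L from by simp, hgr]
      simp
    · rw [show stepN w (out, stack) p = (out, stack ++ [p]) from by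
        simp only [stepN]; rw [if_neg hlen]]
      rw [ih out (stack ++ [p]) (by simp at hlen ⊢; omega)]
      simp

lemma slice_grp (s : List Char) (k : Nat) (x y : Int) (hx : x = 2*(k:Int)) (hy : y = 2*(k:Int)+2) :
    PySem.List.slice s (some x) (some y) = grp s k := by
  have h1 : x = ((2*k : Nat) : Int) := by push_cast; omega
  have h2 : y = ((2*k : Nat) : Int) + ((2 : Nat) : Int) := by push_cast; omega
  rw [h1, h2, PySem.List.slice_natCast_add]
  rfl

lemma getD_Lps (s : List Char) (k : Nat) :
    ((List.range ((s.length + 1) / 2)).map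
      (fun j : Nat => PySem.List.slice s (some (2*(j:Int))) (some (2*(j:Int)+2)))).getD k [] = grp s k := by
  by_cases hk : k < (s.length + 1) / 2
  · simp only [List.getD, List.getElem?_map, List.getElem?_range hk]
    exact slice_grp s k _ _ rfl rfl
  · rw [List.getD_eq_default _ _ (by simp only [List.length_map, List.length_range]; omega)]
    have h2 : s.length ≤ 2*k := by omega
    simp [grp, List.drop_eq_nil_of_le h2]

lemma B_canon (s : List Char) (w : Nat) (hw : 0 < w)
    (L : List (List Char))
    (hL : L = (List.range ((s.length + 1) / 2)).map
      (fun j : Nat => PySem.List.slice s (some (2*(j:Int))) (some (2*(j:Int)+2)))) :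
    ((L.foldl (stepN w) ([], [])).1 ++ (L.foldl (stepN w) ([], [])).2.reverse).flatten =
      (List.range (((s.length + 1) / 2 + w - 1) / w)).flatMap
        (fun t => ((List.range w).reverse.map (fun j => grp s (w*t+j))).flatten) := by
  rw [stack_run w hw L [] [] (by simpa using hw)]
  rw [List.nil_append, List.nil_append]
  rw [groupRev_flat_aux w hw L.length L (le_refl _)]
  rw [hL, List.length_map, List.length_range]
  apply List.flatMap_congr
  intro t _
  congr 1
  exact List.map_congr_left (fun j _ => by rw [getD_Lps])

-- ===== VERDICT =====
theorem little_endian_spec : Claim_equal_little_endian := by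
  intro string size _
  unfold Spec_little_endian
  by_cases h8 : size = 8
  · subst h8
    simp only [little_endian, little_endian_alt, PySem.Str.len_eq, if_true]
    rw [show PySem.Int.floordiv 8 2 = (4:Int) from by decide]
    congr 1
    rw [if_neg (show ¬(8:Int) = 16 from by decide)]
    rw [PySem.List.foldl_append_eq_flatMap, List.nil_append]
    rw [rangeStep 8 8 string.toList.length (by norm_num) (by norm_num), List.flatMap_map]
    rw [rangeStep 2 2 string.toList.length (by norm_num) (by norm_num), List.foldl_map]
    have hfold :
        (List.range ((string.toList.length + 2 - 1) / 2)).foldl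
          (fun (st : List (List Char) × List (List Char)) (k : Nat) =>
            if (((st.2 ++ [PySem.List.slice string.toList (some ((2:Int) * ↑k)) (some ((2:Int) * ↑k + 2))]).length : Nat) : Int) = (4:Int)
            then (st.1 ++ (st.2 ++ [PySem.List.slice string.toList (some ((2:Int) * ↑k)) (some ((2:Int) * ↑k + 2))]).reverse, [])
            else (st.1, st.2 ++ [PySem.List.slice string.toList (some ((2:Int) * ↑k)) (some ((2:Int) * ↑k + 2))])) ([], []) =
        ((List.range ((string.toList.length + 1) / 2)).map
          (fun j : Nat => PySem.List.slice string.toList (some (2*(j:Int))) (some (2*(j:Int)+2)))).foldl (stepN 4) ([], []) := by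
      rw [show (string.toList.length + 2 - 1) / 2 = (string.toList.length + 1) / 2 from by omega]
      rw [List.foldl_map]
      apply PySem.List.foldl_congr_mem
      intro acc k _
      simp only [stepN]
      exact if_congr (by omega) rfl rfl
    rw [hfold, B_canon string.toList 4 (by norm_num) _ rfl]
    rw [show (string.toList.length + 8 - 1) / 8 = ((string.toList.length + 1) / 2 + 4 - 1) / 4 from by omega]
    apply List.flatMap_congr
    intro t _
    rw [show (List.range 4).reverse = [3, 2, 1, 0] from by decide]
    simp only [List.map_cons, List.map_nil, List.flatten_cons, List.flatten_nil, List.append_nil]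
    rw [slice_grp string.toList (4*t+3) ((8:Int)*↑t+6) ((8:Int)*↑t+8) (by push_cast; ring) (by push_cast; ring)]
    rw [slice_grp string.toList (4*t+2) ((8:Int)*↑t+4) ((8:Int)*↑t+6) (by push_cast; ring) (by push_cast; ring)]
    rw [slice_grp string.toList (4*t+1) ((8:Int)*↑t+2) ((8:Int)*↑t+4) (by push_cast; ring) (by push_cast; ring)]
    rw [slice_grp string.toList (4*t+0) ((8:Int)*↑t) ((8:Int)*↑t+2) (by push_cast; ring) (by push_cast; ring)]
    simp [List.append_assoc]
  · by_cases h16 : size = 16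
    · subst h16
      simp only [little_endian, little_endian_alt, PySem.Str.len_eq, if_true]
      rw [show PySem.Int.floordiv 16 2 = (8:Int) from by decide]
      congr 1
      rw [if_neg (show ¬(16:Int) = 8 from by decide)]
      rw [PySem.List.foldl_append_eq_flatMap, List.nil_append]
      rw [rangeStep 16 16 string.toList.length (by norm_num) (by norm_num), List.flatMap_map]
      rw [rangeStep 2 2 string.toList.length (by norm_num) (by norm_num), List.foldl_map]
      have hfold :
          (List.range ((string.toList.length + 2 - 1) / 2)).foldl
            (fun (st : List (List Char) × List (List Char)) (k : Nat) =>
              if (((st.2 ++ [PySem.List.slice string.toList (some ((2:Int) * ↑k)) (some ((2:Int) * ↑k + 2))]).length : Nat) : Int) = (8:Int)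
              then (st.1 ++ (st.2 ++ [PySem.List.slice string.toList (some ((2:Int) * ↑k)) (some ((2:Int) * ↑k + 2))]).reverse, [])
              else (st.1, st.2 ++ [PySem.List.slice string.toList (some ((2:Int) * ↑k)) (some ((2:Int) * ↑k + 2))])) ([], []) =
          ((List.range ((string.toList.length + 1) / 2)).map
            (fun j : Nat => PySem.List.slice string.toList (some (2*(j:Int))) (some (2*(j:Int)+2)))).foldl (stepN 8) ([], []) := by
        rw [show (string.toList.length + 2 - 1) / 2 = (string.toList.length + 1) / 2 from by omega]
        rw [List.foldl_map]
        apply PySem.List.foldl_congr_mem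
        intro acc k _
        simp only [stepN]
        exact if_congr (by omega) rfl rfl
      rw [hfold, B_canon string.toList 8 (by norm_num) _ rfl]
      rw [show (string.toList.length + 16 - 1) / 16 = ((string.toList.length + 1) / 2 + 8 - 1) / 8 from by omega]
      apply List.flatMap_congr
      intro t _
      rw [show (List.range 8).reverse = [7, 6, 5, 4, 3, 2, 1, 0] from by decide]
      simp only [List.map_cons, List.map_nil, List.flatten_cons, List.flatten_nil, List.append_nil]
      rw [slice_grp string.toList (8*t+7) ((16:Int)*↑t+14) ((16:Int)*↑t+16) (by push_cast; ring) (by push_cast; ring)]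
      rw [slice_grp string.toList (8*t+6) ((16:Int)*↑t+12) ((16:Int)*↑t+14) (by push_cast; ring) (by push_cast; ring)]
      rw [slice_grp string.toList (8*t+5) ((16:Int)*↑t+10) ((16:Int)*↑t+12) (by push_cast; ring) (by push_cast; ring)]
      rw [slice_grp string.toList (8*t+4) ((16:Int)*↑t+8) ((16:Int)*↑t+10) (by push_cast; ring) (by push_cast; ring)]
      rw [slice_grp string.toList (8*t+3) ((16:Int)*↑t+6) ((16:Int)*↑t+8) (by push_cast; ring) (by push_cast; ring)]
      rw [slice_grp string.toList (8*t+2) ((16:Int)*↑t+4) ((16:Int)*↑t+6) (by push_cast; ring) (by push_cast; ring)]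
      rw [slice_grp string.toList (8*t+1) ((16:Int)*↑t+2) ((16:Int)*↑t+4) (by push_cast; ring) (by push_cast; ring)]
      rw [slice_grp string.toList (8*t+0) ((16:Int)*↑t) ((16:Int)*↑t+2) (by push_cast; ring) (by push_cast; ring)]
      simp [List.append_assoc]
    · simp only [little_endian, little_endian_alt, if_neg h8, if_neg h16,
        if_neg (show ¬(size = 8 ∨ size = 16) from by tauto)]
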